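-- pv_equiv track=rewrite | github.com/IAMCHEEZTRIX/comp3161 | generate_fake_data.py | split_statment_into_four
-- ===== SOURCE A (Python) =====
-- def split_statment_into_four(sqlstatment):
--     n = len(sqlstatment)
--     k = n // 4
--     remainder = n % 4
--
--     parts = []
--     start = 0
--
--     for i in range(4):
--         end = start + k + (1 if i < remainder else 0)
--         parts.append(sqlstatment[start:end])
--         start = end
--
--     return parts
-- ===== SOURCE B (Python) =====
-- def split_statment_into_four(sqlstatment):
--     def peel(s, parts):
--         if parts == 1:
--             return [s]
--         take = -(-len(s) // parts)  # ceiling division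
--         return [s[:take]] + peel(s[take:], parts - 1)
--     return peel(sqlstatment, 4)
-- ===== Notes on version B (the rewrite author's own statement) =====
-- stated objective: alternative
-- what changed: Replaced the range(4) loop that precomputes quotient/remainder and threads a running start with a recursion on the number of remaining parts that peels off ceil(len(s)/parts) characters at each step and never computes n%4 at all.
import Mathlib
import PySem

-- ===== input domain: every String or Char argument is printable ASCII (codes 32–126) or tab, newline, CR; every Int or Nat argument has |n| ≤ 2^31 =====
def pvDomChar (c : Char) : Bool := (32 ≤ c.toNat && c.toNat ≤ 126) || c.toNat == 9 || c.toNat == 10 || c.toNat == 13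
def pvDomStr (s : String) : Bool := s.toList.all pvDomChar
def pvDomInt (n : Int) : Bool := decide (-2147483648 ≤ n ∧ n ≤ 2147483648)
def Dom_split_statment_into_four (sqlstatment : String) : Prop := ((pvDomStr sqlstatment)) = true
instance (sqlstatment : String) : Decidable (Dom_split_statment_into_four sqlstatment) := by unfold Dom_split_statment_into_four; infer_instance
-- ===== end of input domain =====

-- B replaces A's precomputed-quotient/remainder range(4) loop with a recursion on remaining parts that peels off ceil(len/parts) characters each step (alternative decomposition, same cost).


-- ===== PORT A =====
def split_statment_into_four (sqlstatment : String) : List String :=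
  let n : Int := (sqlstatment.toList.length : Int)
  let k : Int := PySem.Int.floordiv n 4
  let remainder : Int := PySem.Int.mod n 4
  let res := (PySem.List.pyRange 0 4 1).foldl
    (fun (st : List String × Int) i =>
      let start := st.2
      let e := start + k + (if i < remainder then 1 else 0)
      (st.1 ++ [String.ofList (PySem.List.slice sqlstatment.toList (some start) (some e))], e))
    ([], 0)
  res.1

-- ===== PORT B =====
-- peel s parts: if parts == 1 return [s]; else take = ceil(len(s)/parts) via -(-len // parts), peel the head slice and recurse
def pvPeel (s : List Char) : Nat → List String
  | 0 => []          -- unreachable: Python's peel is only called with parts ≥ 1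
  | 1 => [String.ofList s]
  | (p+2) =>
      let take : Int := -(PySem.Int.floordiv (-(s.length : Int)) ((p : Int) + 2))
      String.ofList (PySem.List.slice s none (some take)) ::
        pvPeel (PySem.List.slice s (some take) none) (p + 1)

def split_statment_into_four_alt (sqlstatment : String) : List String :=
  pvPeel sqlstatment.toList 4

-- ===== PRECONDITION & SPEC =====
def Spec_split_statment_into_four (sqlstatment : String) (out : List String) : Prop := out = split_statment_into_four_alt sqlstatment
instance (sqlstatment : String) (out : List String) : Decidable (Spec_split_statment_into_four sqlstatment out) := by unfold Spec_split_statment_into_four; infer_instance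

-- ===== CLAIM (what is proved, stated in full; the proofs are below) =====
def Claim_equal_split_statment_into_four : Prop := ∀ (sqlstatment : String), Dom_split_statment_into_four sqlstatment → Spec_split_statment_into_four sqlstatment (split_statment_into_four sqlstatment)

-- ===== LEMMAS AND PROOFS =====
theorem pv_take_congr (l : List Char) {a b : Nat} (h : a = b) : l.take a = l.take b := by rw [h]

theorem pv_drop_congr (l : List Char) {a b : Nat} (h : a = b) : l.drop a = l.drop b := by rw [h]

theorem pv_dt_congr (l : List Char) {a b c d : Nat} (h1 : a = c) (h2 : b = d) :
    (l.drop a).take b = (l.drop c).take d := by rw [h1, h2]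

theorem pyRange04 : PySem.List.pyRange 0 4 1 = [0, 1, 2, 3] := by decide

-- ===== VERDICT (by name: the statement is the Claim_ definition above) =====
theorem split_statment_into_four_spec : Claim_equal_split_statment_into_four := by
  intro s _
  unfold Spec_split_statment_into_four split_statment_into_four split_statment_into_four_alt
  rw [pyRange04]
  set l := s.toList with hl
  have h4 : (0:Int) < 4 := by omega
  simp only [List.foldl, pvPeel, PySem.Int.mod_eq_emod_of_pos h4,
    PySem.Int.floordiv_eq_ediv_of_pos h4]
  push_cast
  norm_num
  set nn := l.length with hnn
  have e4 : ∀ m : Nat, -(-(m:Int)/4) = (((m+3)/4 : Nat) : Int) := fun m => by omega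
  have e3 : ∀ m : Nat, -(-(m:Int)/3) = (((m+2)/3 : Nat) : Int) := fun m => by omega
  have e2 : ∀ m : Nat, -(-(m:Int)/2) = (((m+1)/2 : Nat) : Int) := fun m => by omega
  have em : ((nn:Int) % 4) = ((nn % 4 : Nat) : Int) := by omega
  have ed : ((nn:Int) / 4) = ((nn / 4 : Nat) : Int) := by omega
  simp only [e4, e3, e2, em, ed, PySem.List.slice_from_natCast, PySem.List.slice_to_natCast,
    List.length_drop, List.drop_drop]
  have hr : nn % 4 = 0 ∨ nn % 4 = 1 ∨ nn % 4 = 2 ∨ nn % 4 = 3 := by omega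
  rcases hr with hr | hr | hr | hr <;>
    simp only [hr] <;> norm_num <;> norm_cast <;>
    simp only [PySem.List.slice_natCast, PySem.List.slice_to_natCast] <;>
    refine ⟨?_, ?_, ?_, ?_⟩ <;> apply congrArg <;>
    first
      | exact pv_take_congr _ (by omega)
      | exact pv_dt_congr _ (by omega) (by omega)
      | (rw [List.take_of_length_le (by simp; omega)]; exact pv_drop_congr _ (by omega))
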